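-- pv_equiv track=rewrite | github.com/andrewni420/Evolutionary-Computation | poker/foobar.py | solution
-- ===== SOURCE A (Python) =====
-- def isprime(primes, i):
--     for p in primes:
--        if i%p == 0:
--           return False
--     return True
--
-- def solution(i):
--     primes = []
--     soln = ""
--     cur_chars = 0
--     j=2
--     while True:
--         if isprime(primes, j):
--             primes.append(j)
--             cur_chars+=len(str(j))
--             if (cur_chars>i):
--                 soln+=str(j)[-(cur_chars-i):]
--                 cur_chars=i
--             if (len(soln)>=5):
--                 return soln[:5]
--         j+=1
-- ===== SOURCE B (Python) =====
-- def _isprime(j):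
--     d = 2
--     while d * d <= j:
--         if j % d == 0:
--             return False
--         d += 1
--     return True
--
-- def solution(i):
--     s = ""
--     j = 2
--     while len(s) < i + 5:
--         if _isprime(j):
--             s += str(j)
--         j += 1
--     return s[i:i+5]
-- ===== Notes on version B (the rewrite author's own statement) =====
-- stated objective: faster
-- what changed: B tests each candidate by trial division only up to sqrt(j) (no stored primes list) and builds the concatenated digit prefix once, then slices s[i:i+5], instead of A's test of every candidate against all previously found primes with incremental suffix trimming of the result.
-- outside the precondition, e.g. on solution(-1): A returns '23571', B returns '7'
import Mathlib
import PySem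

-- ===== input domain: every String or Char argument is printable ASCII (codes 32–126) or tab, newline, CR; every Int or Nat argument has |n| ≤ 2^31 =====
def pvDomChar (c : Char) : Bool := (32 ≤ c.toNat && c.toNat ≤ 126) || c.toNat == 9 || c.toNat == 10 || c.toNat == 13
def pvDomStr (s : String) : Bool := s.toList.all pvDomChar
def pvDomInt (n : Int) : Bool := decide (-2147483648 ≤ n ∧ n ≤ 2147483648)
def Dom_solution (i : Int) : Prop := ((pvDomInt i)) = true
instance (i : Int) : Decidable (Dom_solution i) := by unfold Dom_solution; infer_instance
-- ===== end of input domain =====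

-- B replaces A's primality test against the whole list of previously found primes by trial
-- division up to sqrt(j), and builds the digit prefix once, slicing s[i:i+5] at the end
-- (objective: faster). Strings are carried as List Char (code points) inside the loops; the
-- fuel parameter is only a totality device for Lean — equivalence is proved for every fuel.

-- ===== PORT A =====
-- fuel bound shared by both ports (totality device only; the proofs never rely on its size)
def pvFuel (i : Int) : Nat := 20 * i.toNat + 200

def isprimeA (primes : List Int) (i : Int) : Bool :=
  match primes with
  | [] => true
  | p :: rest => if PySem.Int.mod i p == 0 then false else isprimeA rest i

def loopA (i : Int) : Nat → List Int → List Char → Int → Int → String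
  | 0, _, _, _, _ => ""
  | fuel+1, primes, soln, cur, j =>
    if isprimeA primes j then
      let dj := PySem.Int.toChars j
      let primes' := primes ++ [j]
      let cur' := cur + (dj.length : Int)
      let soln' := if cur' > i then soln ++ PySem.List.slice dj (some (-(cur' - i))) none else soln
      let cur'' := if cur' > i then i else cur'
      if 5 ≤ (soln'.length : Int) then String.ofList (PySem.List.slice soln' none (some 5))
      else loopA i fuel primes' soln' cur'' (j+1)
    else loopA i fuel primes soln cur (j+1)

def solution (i : Int) : String := loopA i (pvFuel i) [] [] 0 2

-- ===== PORT B =====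
def trialB (j : Int) (d : Nat) : Bool :=
  if h : (d : Int) * d ≤ j then
    if PySem.Int.mod j d == 0 then false else trialB j (d+1)
  else true
termination_by j.toNat + 1 - d
decreasing_by
  have hd : (d * d : Nat) ≤ j.toNat := by
    have h0 : (0:Int) ≤ (d:Int) * d := by positivity
    have : ((d * d : Nat) : Int) ≤ j := by push_cast; exact h
    omega
  have hdd : d ≤ d * d := by
    rcases Nat.eq_zero_or_pos d with h0 | h0
    · simp [h0]
    · exact Nat.le_mul_of_pos_left d h0
  omega

def isprimeB (j : Int) : Bool := trialB j 2

def loopB (i : Int) (fuel : Nat) (s : List Char) (j : Int) : String :=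
  if (s.length : Int) < i + 5 then
    match fuel with
    | 0 => ""
    | f+1 => if isprimeB j then loopB i f (s ++ PySem.Int.toChars j) (j+1) else loopB i f s (j+1)
  else String.ofList (PySem.List.slice s (some i) (some (i+5)))
termination_by fuel

def solution_alt (i : Int) : String := loopB i (pvFuel i) [] 2

-- ===== PRECONDITION & SPEC =====
-- Pre_ excludes negative offsets i, on which A's value (always "23571", the same as i = 0)
-- is an accident of Python's negative-slice clamping; a prefix offset is naturally ≥ 0.
def Pre_solution (i : Int) : Prop := 0 ≤ i
instance (i : Int) : Decidable (Pre_solution i) := by unfold Pre_solution; infer_instance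
def pvWitness_solution : Int := 3

def Spec_solution (i : Int) (out : String) : Prop := out = solution_alt i
instance (i : Int) (out : String) : Decidable (Spec_solution i out) := by unfold Spec_solution; infer_instance

-- ===== CLAIM (what is proved, stated in full; the proofs are below) =====
def Claim_equal_solution : Prop := ∀ (i : Int), Dom_solution i → Pre_solution i → Spec_solution i (solution i)

-- ===== LEMMAS AND PROOFS =====

def IntPrime (j : Int) : Prop := Nat.Prime j.toNat

theorem isprimeA_true_iff (primes : List Int) (j : Int) :
    isprimeA primes j = true ↔ ∀ p ∈ primes, ¬ (p ∣ j) := by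
  induction primes with
  | nil => simp [isprimeA]
  | cons p rest ih =>
    simp only [isprimeA, List.mem_cons]
    rcases eq_or_ne (PySem.Int.mod j p) 0 with h | h
    · have hdvd : p ∣ j := (PySem.Int.mod_eq_zero_iff_dvd j p).mp h
      rw [if_pos (by simp [h])]
      constructor
      · intro hf; cases hf
      · intro hall; exact ((hall p (Or.inl rfl)) hdvd).elim
    · have hndvd : ¬ p ∣ j := fun hd => h ((PySem.Int.mod_eq_zero_iff_dvd j p).mpr hd)
      rw [if_neg (by simpa using h), ih]
      constructor
      · rintro hrest q (rfl | hq)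
        · exact hndvd
        · exact hrest q hq
      · intro hrest q hq
        exact hrest q (Or.inr hq)

theorem testA_iff (primes : List Int) (j : Int) (h2 : 2 ≤ j)
    (hmem : ∀ p ∈ primes, 2 ≤ p ∧ p < j)
    (hall : ∀ q : Int, 2 ≤ q → q < j → IntPrime q → q ∈ primes) :
    (isprimeA primes j = true ↔ IntPrime j) := by
  have hjn : (j.toNat : Int) = j := Int.toNat_of_nonneg (by omega)
  have hn2 : 2 ≤ j.toNat := by omega
  rw [isprimeA_true_iff]
  constructor
  · intro hA
    by_contra hnp
    obtain ⟨m, hmdvd, hm2, hmlt⟩ := Nat.exists_dvd_of_not_prime2 hn2 hnp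
    have hq_prime : Nat.Prime j.toNat.minFac := Nat.minFac_prime (by omega)
    have hq_dvd : j.toNat.minFac ∣ j.toNat := Nat.minFac_dvd _
    have hq_le : j.toNat.minFac ≤ m := Nat.minFac_le_of_dvd hm2 hmdvd
    have hq_lt : j.toNat.minFac < j.toNat := lt_of_le_of_lt hq_le hmlt
    set q : Int := (j.toNat.minFac : Int) with hqdef
    have hq2 : 2 ≤ q := by rw [hqdef]; exact_mod_cast hq_prime.two_le
    have hqj : q < j := by omega
    have hqp : IntPrime q := by
      unfold IntPrime
      simpa [hqdef] using hq_prime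
    have hqmem : q ∈ primes := hall q hq2 hqj hqp
    exact hA q hqmem (by rw [hqdef, ← hjn]; exact_mod_cast hq_dvd)
  · intro hp p hpmem hpdvd
    obtain ⟨hp2, hplt⟩ := hmem p hpmem
    have hpn : (p.toNat : Int) = p := Int.toNat_of_nonneg (by omega)
    have hdvdn : p.toNat ∣ j.toNat := by
      rw [← Int.natCast_dvd_natCast, hpn, hjn]; exact hpdvd
    have hp' : Nat.Prime j.toNat := hp
    rcases (Nat.Prime.eq_one_or_self_of_dvd hp' p.toNat hdvdn) with h1 | h1
    · omega
    · omega

theorem trialB_true_iff (j : Int) (d : Nat) :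
    trialB j d = true ↔ ∀ e : Nat, d ≤ e → (e : Int) * e ≤ j → ¬ ((e : Int) ∣ j) := by
  induction d using trialB.induct (j := j) with
  | case1 d h hmod =>
    rw [trialB, dif_pos h, if_pos hmod]
    have hdvd : (d : Int) ∣ j := (PySem.Int.mod_eq_zero_iff_dvd j d).mp (by simpa using hmod)
    constructor
    · intro hf; cases hf
    · intro hall; exact ((hall d (le_refl d) h) hdvd).elim
  | case2 d h hmod ih =>
    rw [trialB, dif_pos h, if_neg hmod, ih]
    constructor
    · intro hA e hde hee
      rcases Nat.eq_or_lt_of_le hde with heq | hlt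
      · subst heq
        exact fun hd => hmod (by simpa using (PySem.Int.mod_eq_zero_iff_dvd j d).mpr hd)
      · exact hA e hlt hee
    · intro hA e hde hee
      exact hA e (by omega) hee
  | case3 d h =>
    rw [trialB, dif_neg h]
    simp only [true_iff]
    intro e hde hee
    exfalso
    have : (d : Int) * d ≤ (e : Int) * e := by
      have : d * d ≤ e * e := Nat.mul_le_mul hde hde
      exact_mod_cast this
    exact h (le_trans this hee)

theorem testB_iff (j : Int) (h2 : 2 ≤ j) : (isprimeB j = true ↔ IntPrime j) := by
  have hjn : (j.toNat : Int) = j := Int.toNat_of_nonneg (by omega)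
  unfold isprimeB IntPrime
  rw [trialB_true_iff]
  rw [Nat.prime_def_le_sqrt]
  constructor
  · intro hB
    refine ⟨by omega, fun m hm2 hmsq hdvd => ?_⟩
    have hmm : (m : Int) * m ≤ j := by
      have : m * m ≤ j.toNat := Nat.le_sqrt.mp hmsq
      calc ((m : Int) * m) = ((m * m : Nat) : Int) := by push_cast; ring
        _ ≤ (j.toNat : Int) := by exact_mod_cast this
        _ = j := hjn
    exact hB m hm2 hmm (by rw [← hjn]; exact_mod_cast hdvd)
  · rintro ⟨-, hP⟩ e he2 hee hdvd
    have hmsq : e ≤ j.toNat.sqrt := by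
      rw [Nat.le_sqrt]
      have : ((e * e : Nat) : Int) ≤ (j.toNat : Int) := by rw [hjn]; push_cast; exact hee
      exact_mod_cast this
    refine hP e he2 hmsq ?_
    rw [← hjn] at hdvd
    exact_mod_cast hdvd

def LoopInv (i : Int) (primes : List Int) (soln : List Char) (cur j : Int) (s : List Char) : Prop :=
  2 ≤ j ∧ 0 ≤ i ∧
  (∀ p ∈ primes, 2 ≤ p ∧ p < j) ∧
  (∀ q : Int, 2 ≤ q → q < j → IntPrime q → q ∈ primes) ∧
  ((cur = (s.length : Int) ∧ cur ≤ i ∧ soln = []) ∨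
   (cur = i ∧ i ≤ (s.length : Int) ∧ soln = s.drop i.toNat))

theorem slice_neg_eq_drop (dj : List Char) (k : Int) (hk : 0 < k) :
    PySem.List.slice dj (some (-k)) none = dj.drop (dj.length - k.toNat) := by
  obtain ⟨n, rfl⟩ : ∃ n : Nat, k = (n : Int) := ⟨k.toNat, by omega⟩
  have hn : 0 < n := by exact_mod_cast hk
  rw [PySem.List.slice_from_neg_natCast dj n hn]
  simp

theorem slice_window (s : List Char) (i : Int) (hi : 0 ≤ i) :
    PySem.List.slice s (some i) (some (i + 5)) = (s.drop i.toNat).take 5 := by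
  rw [PySem.List.slice_toNat s hi (by omega)]
  congr 1
  omega

theorem take_five (l : List Char) :
    PySem.List.slice l none (some 5) = l.take 5 := by
  rw [PySem.List.slice_to l (by norm_num)]
  rfl

-- continuation after a prime has been appended and A's state is (s'.drop i, i)
theorem step_cont (f : Nat) (i : Int) (primes' : List Int) (j : Int) (s' : List Char)
    (hih : ∀ (i : Int) (primes : List Int) (soln : List Char) (cur j : Int) (s : List Char),
      LoopInv i primes soln cur j s → (s.length : Int) < i + 5 →
      loopA i f primes soln cur j = loopB i f s j)
    (hj2 : 2 ≤ j + 1) (hi0 : 0 ≤ i)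
    (hmem' : ∀ p ∈ primes', 2 ≤ p ∧ p < j + 1)
    (hall' : ∀ q : Int, 2 ≤ q → q < j + 1 → IntPrime q → q ∈ primes')
    (hile : i ≤ (s'.length : Int)) :
    (if 5 ≤ (((s'.drop i.toNat).length : Nat) : Int) then
       String.ofList (PySem.List.slice (s'.drop i.toNat) none (some 5))
     else loopA i f primes' (s'.drop i.toNat) i (j+1)) = loopB i f s' (j+1) := by
  have hlen : ((s'.drop i.toNat).length : Int) = (s'.length : Int) - i := by
    rw [List.length_drop]; omega
  by_cases hdone : i + 5 ≤ (s'.length : Int)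
  · rw [if_pos (by omega), loopB.eq_def, if_neg (by omega), take_five, slice_window s' i hi0]
  · rw [if_neg (by omega)]
    exact hih i primes' (s'.drop i.toNat) i (j+1) s'
      ⟨hj2, hi0, hmem', hall', Or.inr ⟨rfl, hile, rfl⟩⟩ (by omega)

theorem loop_agree (fuel : Nat) : ∀ (i : Int) (primes : List Int) (soln : List Char) (cur j : Int) (s : List Char),
    LoopInv i primes soln cur j s → (s.length : Int) < i + 5 →
    loopA i fuel primes soln cur j = loopB i fuel s j := by
  induction fuel with
  | zero =>
    intro i primes soln cur j s _ hlen
    rw [loopB.eq_def, if_pos hlen]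
    rfl
  | succ f ih =>
    intro i primes soln cur j s hInv hlen
    obtain ⟨hj2, hi0, hmem, hall, hstate⟩ := hInv
    have hj2' : 2 ≤ j + 1 := by omega
    rw [loopB.eq_def, if_pos hlen]
    by_cases hp : isprimeA primes j = true
    · -- j is prime
      have hprime : IntPrime j := (testA_iff primes j hj2 hmem hall).mp hp
      have hpB : isprimeB j = true := (testB_iff j hj2).mpr hprime
      have hmem' : ∀ p ∈ primes ++ [j], 2 ≤ p ∧ p < j + 1 := by
        intro p hpm
        rcases List.mem_append.mp hpm with hpm | hpm
        · have := hmem p hpm; omega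
        · simp at hpm; omega
      have hall' : ∀ q : Int, 2 ≤ q → q < j + 1 → IntPrime q → q ∈ primes ++ [j] := by
        intro q h2q hqj hqp
        rcases lt_or_eq_of_le (by omega : q ≤ j) with h | h
        · exact List.mem_append.mpr (Or.inl (hall q h2q h hqp))
        · subst h; exact List.mem_append.mpr (Or.inr (by simp))
      simp only [loopA, hp, if_true, hpB]
      set dj := PySem.Int.toChars j with hdj
      have hdjlen : (0:Int) ≤ (dj.length : Int) := by positivity
      rcases hstate with ⟨hcur, hci, hsoln⟩ | ⟨hcur, hile, hsoln⟩
      · -- below the offset: soln is empty, cur counts the whole prefix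
        subst hsoln; subst hcur
        by_cases hgt : (s.length : Int) + (dj.length : Int) > i
        · rw [if_pos hgt, if_pos hgt]
          have hk : (0:Int) < (s.length : Int) + (dj.length : Int) - i := by omega
          rw [slice_neg_eq_drop dj _ hk, List.nil_append]
          have hdrop : dj.drop (dj.length - ((s.length : Int) + (dj.length : Int) - i).toNat)
              = (s ++ dj).drop i.toNat := by
            rw [List.drop_append]
            have h1 : s.drop i.toNat = [] := List.drop_eq_nil_of_le (by omega)
            rw [h1, List.nil_append]
            congr 1
            omega
          rw [hdrop]
          exact step_cont f i (primes ++ [j]) j (s ++ dj) ih hj2' hi0 hmem' hall'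
            (by rw [List.length_append]; push_cast; omega)
        · rw [if_neg hgt, if_neg hgt]
          have h5 : ¬ (5 ≤ ((List.length ([] : List Char) : Nat) : Int)) := by simp
          rw [if_neg h5]
          refine ih i (primes ++ [j]) [] ((s.length : Int) + (dj.length : Int)) (j+1) (s ++ dj)
            ⟨hj2', hi0, hmem', hall', Or.inl ⟨by rw [List.length_append]; push_cast; ring, by omega, rfl⟩⟩ ?_
          rw [List.length_append]; push_cast; omega
      · -- at the offset: soln mirrors the prefix past i
        subst hsoln; subst cur
        by_cases hgt : i + (dj.length : Int) > i
        · rw [if_pos hgt, if_pos hgt]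
          have hk : (0:Int) < i + (dj.length : Int) - i := by omega
          rw [slice_neg_eq_drop dj _ hk]
          have hdrop : s.drop i.toNat ++ dj.drop (dj.length - (i + (dj.length : Int) - i).toNat)
              = (s ++ dj).drop i.toNat := by
            rw [List.drop_append]
            congr 2
            omega
          rw [hdrop]
          exact step_cont f i (primes ++ [j]) j (s ++ dj) ih hj2' hi0 hmem' hall'
            (by rw [List.length_append]; push_cast; omega)
        · rw [if_neg hgt, if_neg hgt]
          have hdjnil : dj = [] := by
            have : dj.length = 0 := by omega
            exact List.eq_nil_of_length_eq_zero this
          have h5 : ¬ (5 ≤ (((s.drop i.toNat).length : Nat) : Int)) := by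
            rw [List.length_drop]; omega
          rw [if_neg h5]
          have hiplus : i + (dj.length : Int) = i := by rw [hdjnil]; simp
          rw [hiplus, hdjnil, List.append_nil]
          exact ih i (primes ++ [j]) (s.drop i.toNat) i (j+1) s
            ⟨hj2', hi0, hmem', hall', Or.inr ⟨rfl, hile, rfl⟩⟩ hlen
    · -- j is not prime
      have hnprime : ¬ IntPrime j := fun hpr => hp ((testA_iff primes j hj2 hmem hall).mpr hpr)
      have hpB : isprimeB j = false := by
        cases h : isprimeB j
        · rfl
        · exact absurd ((testB_iff j hj2).mp h) hnprime
      have hall' : ∀ q : Int, 2 ≤ q → q < j + 1 → IntPrime q → q ∈ primes := by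
        intro q h2q hqj hqp
        rcases lt_or_eq_of_le (by omega : q ≤ j) with h | h
        · exact hall q h2q h hqp
        · subst h; exact absurd hqp hnprime
      have hmem' : ∀ p ∈ primes, 2 ≤ p ∧ p < j + 1 := by
        intro p hpm; have := hmem p hpm; omega
      simp only [loopA, hp, if_false, hpB, Bool.false_eq_true]
      exact ih i primes soln cur (j+1) s ⟨hj2', hi0, hmem', hall', hstate⟩ hlen

theorem solution_spec : Claim_equal_solution := by
  intro i _ hpre
  have hi0 : (0:Int) ≤ i := hpre
  unfold Spec_solution solution solution_alt
  refine loop_agree (pvFuel i) i [] [] 0 2 [] ⟨by norm_num, hi0, by simp, ?_, Or.inl ⟨by simp, hi0, rfl⟩⟩ (by simp; omega)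
  intro q h2q hq2 _
  omega
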